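-- pv_equiv track=rewrite | github.com/blcrosbie/COVID-19-Airplane-Seating-With-Social-Distance | src/randomize.py | set_groups
-- ===== SOURCE A (Python) =====
-- def get_correction_counts(psgr_list, max_group_size):
--     # this is metadata calculator to help set groups by organizing
--     # how many passengers were given the group size random assignment
--     # then this needs to be checked to ensure group sizes make sense in the roster
--
--     groups_info = []
--     for i in range(1, max_group_size+1):
--         count = 0
--         for psgr in psgr_list:
--             if psgr['group_size'] == i:
--                 count += 1
--
--         unique_count = int(count/i)
--         correction = count - i*unique_count
--         groups_info.append({'size': i, 'count': count, 'unique_count':unique_count, 'correction':correction})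
--
--     return groups_info
--
-- def set_groups(passenger_list):
--     max_group_size = 7
--     groups_info = get_correction_counts(passenger_list, max_group_size)
--
--     # now correct the details from random generator to realistic groupings
--     # default all corrections to group size 1 for simplicity
--
--     for i in range(1, max_group_size):
--         # starting from one in index here jumps to 'size == 2',
--         g_info = groups_info[i]
--         g_size = g_info['size']
--
--         num_corrections = g_info['correction']
--         n = 0
--
--         while n < num_corrections:
--             for psgr in passenger_list:
--                 if psgr['group_size'] == g_size and n < num_corrections:
--                     psgr['group_size'] = 1
--                     n += 1
--
--     return passenger_list
-- ===== SOURCE B (Python) =====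
-- def set_groups(passenger_list):
--     # One counting pass + one correction pass (mutates the list in place, like A).
--     counts = {}
--     for psgr in passenger_list:
--         g = psgr['group_size']
--         counts[g] = counts.get(g, 0) + 1
--     remaining = {g: counts.get(g, 0) % g for g in range(2, 8)}
--     for psgr in passenger_list:
--         g = psgr['group_size']
--         if 2 <= g <= 7 and remaining[g] > 0:
--             psgr['group_size'] = 1
--             remaining[g] -= 1
--     return passenger_list
-- ===== Notes on version B (the rewrite author's own statement) =====
-- stated objective: faster
-- what changed: Replaces A's seven per-size counting scans plus per-size while-loops that rescan the whole list with a single counting pass building a size->count dict, a remainder table remaining[g] = count_g % g for g in 2..7, and one correction pass that resets a passenger's group_size to 1 while its size's remainder is positive.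
import Mathlib
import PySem

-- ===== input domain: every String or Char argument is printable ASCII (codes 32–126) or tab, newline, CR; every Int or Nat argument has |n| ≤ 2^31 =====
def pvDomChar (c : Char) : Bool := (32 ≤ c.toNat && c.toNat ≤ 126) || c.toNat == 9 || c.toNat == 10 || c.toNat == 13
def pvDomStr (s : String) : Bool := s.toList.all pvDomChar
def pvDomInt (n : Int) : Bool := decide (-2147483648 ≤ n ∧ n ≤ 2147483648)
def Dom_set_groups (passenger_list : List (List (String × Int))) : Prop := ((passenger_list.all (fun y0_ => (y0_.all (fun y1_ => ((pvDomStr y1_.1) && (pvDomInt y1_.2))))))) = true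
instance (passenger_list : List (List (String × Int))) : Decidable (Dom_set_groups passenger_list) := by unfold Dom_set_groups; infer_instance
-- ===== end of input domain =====

-- B rewrites A's seven counting passes and per-size while+rescan loops as one counting
-- pass plus one correction pass (both programs mutate the passenger dicts in place in
-- Python; the equivalence proved here is about the returned list, which is the same list).

-- shared helper: psgr['group_size'] read, and psgr['group_size'] = 1 write
def pvGs (psgr : List (String × Int)) : Option Int := (PySem.Dict.mk psgr).get? "group_size"
def pvSet1 (psgr : List (String × Int)) : List (String × Int) :=
  ((PySem.Dict.mk psgr).insert "group_size" 1).items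

-- ===== PORT A =====
-- `psgr['group_size'] == i` raises KeyError on a missing key (excluded by Pre_); here a
-- missing key simply does not match.  `int(count/i)` is floor division since count ≥ 0.
def get_correction_counts (psgr_list : List (List (String × Int))) (max_group_size : Int) :
    List (List (String × Int)) :=
  (PySem.List.pyRange 1 (max_group_size + 1) 1).foldl
    (fun groups_info i =>
      let count := psgr_list.foldl
        (fun count psgr => if pvGs psgr = some i then count + 1 else count) (0 : Int)
      let unique_count := PySem.Int.floordiv count i
      let correction := count - i * unique_count
      groups_info ++
        [[("size", i), ("count", count), ("unique_count", unique_count), ("correction", correction)]])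
    []

-- the inner `for psgr in passenger_list:` pass (mutation in place = rebuilding the list)
def pvForPass (g_size num_corrections : Int) :
    List (List (String × Int)) → Int → List (List (String × Int)) × Int
  | [], n => ([], n)
  | psgr :: rest, n =>
    if pvGs psgr = some g_size ∧ n < num_corrections then
      let r := pvForPass g_size num_corrections rest (n + 1)
      (pvSet1 psgr :: r.1, r.2)
    else
      let r := pvForPass g_size num_corrections rest n
      (psgr :: r.1, r.2)

-- the `while n < num_corrections:` loop; the fuel only makes the recursion total
-- (one pass always reaches n = num_corrections, as the proofs below establish)
def pvWhile (g_size num_corrections : Int) :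
    Nat → List (List (String × Int)) → Int → List (List (String × Int)) × Int
  | 0, l, n => (l, n)
  | fuel + 1, l, n =>
    if n < num_corrections then
      let r := pvForPass g_size num_corrections l n
      pvWhile g_size num_corrections fuel r.1 r.2
    else (l, n)

def set_groups (passenger_list : List (List (String × Int))) : List (List (String × Int)) :=
  let max_group_size : Int := 7
  let groups_info := get_correction_counts passenger_list max_group_size
  (PySem.List.pyRange 1 max_group_size 1).foldl
    (fun pl i =>
      match PySem.List.pyGet? groups_info i with
      | none => pl   -- unreachable: 1 ≤ i ≤ 6 < groups_info.length = 7
      | some g_info =>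
        let g_size := ((PySem.Dict.mk g_info).get? "size").getD 0          -- key always present
        let num_corrections := ((PySem.Dict.mk g_info).get? "correction").getD 0
        (pvWhile g_size num_corrections (num_corrections.toNat + 1) pl 0).1)
    passenger_list

-- ===== PORT B =====
def set_groups_alt (passenger_list : List (List (String × Int))) : List (List (String × Int)) :=
  let counts : PySem.Dict Int Int := passenger_list.foldl
    (fun d psgr =>
      match pvGs psgr with
      | some g => d.insert g (d.getD g 0 + 1)
      | none => d)     -- KeyError in Python (excluded by Pre_)
    (PySem.Dict.mk [])
  let remaining : PySem.Dict Int Int := (PySem.List.pyRange 2 8 1).foldl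
    (fun d g => d.insert g (PySem.Int.mod (counts.getD g 0) g)) (PySem.Dict.mk [])
  (passenger_list.foldl
    (fun (st : PySem.Dict Int Int × List (List (String × Int))) psgr =>
      match pvGs psgr with
      | some g =>
        if 2 ≤ g ∧ g ≤ 7 ∧ 0 < st.1.getD g 0 then
          (st.1.insert g (st.1.getD g 0 - 1), st.2 ++ [pvSet1 psgr])
        else (st.1, st.2 ++ [psgr])
      | none => (st.1, st.2 ++ [psgr]))
    (remaining, [])).2

-- ===== PRECONDITION & SPEC =====
-- Pre_ excludes (a) passengers without a 'group_size' key, on which the Python A raises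
-- KeyError (and B too), and (b) association lists with duplicate keys, which do not
-- denote a Python dict faithfully (dict construction collapses them).
def Pre_set_groups (passenger_list : List (List (String × Int))) : Prop :=
  ∀ psgr ∈ passenger_list,
    (PySem.Dict.mk psgr).contains "group_size" = true ∧ (PySem.Dict.mk psgr).keys.Nodup
instance (passenger_list : List (List (String × Int))) : Decidable (Pre_set_groups passenger_list) := by
  unfold Pre_set_groups; infer_instance

def pvWitness_set_groups : (List (List (String × Int))) :=
  [[("group_size", 3), ("row", 4)], [("group_size", 3)], [("group_size", 1)]]

def Spec_set_groups (passenger_list : List (List (String × Int))) (out : List (List (String × Int))) : Prop := out = set_groups_alt passenger_list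
instance (passenger_list : List (List (String × Int))) (out : List (List (String × Int))) : Decidable (Spec_set_groups passenger_list out) := by unfold Spec_set_groups; infer_instance

-- ===== CLAIM (what is proved, stated in full; the proofs are below) =====
def Claim_equal_set_groups : Prop := ∀ (passenger_list : List (List (String × Int))), Dom_set_groups passenger_list → Pre_set_groups passenger_list → Spec_set_groups passenger_list (set_groups passenger_list)

-- ===== LEMMAS AND PROOFS =====

-- number of passengers whose group size is g
def pvMc (g : Int) (l : List (List (String × Int))) : Nat :=
  l.countP (fun p => decide (pvGs p = some g))

-- reset the first k passengers of size g to size 1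
def pvResetK (g k : Int) : List (List (String × Int)) → List (List (String × Int))
  | [] => []
  | p :: rest =>
    if pvGs p = some g ∧ 0 < k then pvSet1 p :: pvResetK g (k - 1) rest
    else p :: pvResetK g k rest

-- one-pass reset with a table r of remaining per-size budgets
def pvDec (r : Int → Int) (g : Int) : Int → Int := fun x => if x = g then r g - 1 else r x

def pvResetF (r : Int → Int) : List (List (String × Int)) → List (List (String × Int))
  | [] => []
  | p :: rest =>
    match pvGs p with
    | some g =>
      if 2 ≤ g ∧ g ≤ 7 ∧ 0 < r g then pvSet1 p :: pvResetF (pvDec r g) rest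
      else p :: pvResetF r rest
    | none => p :: pvResetF r rest

def pvFoldStep (r : Int → Int) (sizes : List Int) (l : List (List (String × Int))) :
    List (List (String × Int)) :=
  sizes.foldl (fun l g => pvResetK g (r g) l) l

def pvR0 (l : List (List (String × Int))) (g : Int) : Int := PySem.Int.mod ((pvMc g l : Nat) : Int) g

theorem pvGs_set1 (p : List (String × Int)) : pvGs (pvSet1 p) = some 1 := by
  unfold pvGs pvSet1
  exact PySem.Dict.get?_insert_self _ _ _

theorem pvResetK_nonpos (g k : Int) (hk : k ≤ 0) (l : List (List (String × Int))) :
    pvResetK g k l = l := by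
  induction l with
  | nil => rfl
  | cons p rest ih =>
    rw [pvResetK, if_neg (by intro h; omega), ih]

theorem pvForPass_done (g c : Int) (l : List (List (String × Int))) (n : Int) (h : ¬ n < c) :
    pvForPass g c l n = (l, n) := by
  induction l with
  | nil => rfl
  | cons p rest ih =>
    rw [pvForPass, if_neg (by intro hh; exact h hh.2), ih]

theorem pvForPass_eq (g c : Int) (l : List (List (String × Int))) (n : Int) (h : n ≤ c) :
    pvForPass g c l n = (pvResetK g (c - n) l, n + min (c - n) (pvMc g l : Int)) := by
  induction l generalizing n with
  | nil =>
    simp [pvForPass, pvResetK, pvMc]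
    omega
  | cons p rest ih =>
    by_cases hp : pvGs p = some g
    · have hmc : pvMc g (p :: rest) = pvMc g rest + 1 := by
        simp [pvMc, hp]
      by_cases hn : n < c
      · rw [pvForPass, if_pos ⟨hp, hn⟩, ih (n + 1) (by omega),
          pvResetK, if_pos ⟨hp, by omega⟩]
        refine Prod.ext ?_ ?_
        · simp; ring_nf
        · simp [hmc]; omega
      · have hnc : n = c := le_antisymm h (by omega)
        rw [pvForPass, if_neg (by intro hh; exact hn hh.2),
          pvForPass_done g c rest n hn,
          pvResetK, if_neg (by intro hh; omega),
          pvResetK_nonpos g (c - n) (by omega) rest]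
        refine Prod.ext rfl ?_
        simp [hmc]
        omega
    · have hmc : pvMc g (p :: rest) = pvMc g rest := by
        simp [pvMc, hp]
      rw [pvForPass, if_neg (by intro hh; exact hp hh.1), ih n h,
        pvResetK, if_neg (by intro hh; exact hp hh.1)]
      refine Prod.ext rfl ?_
      simp [hmc]

theorem pvWhile_done (g c : Int) (fuel : Nat) (l : List (List (String × Int))) (n : Int)
    (h : ¬ n < c) : pvWhile g c fuel l n = (l, n) := by
  cases fuel with
  | zero => rfl
  | succ k => rw [pvWhile, if_neg h]

theorem pvWhile_eq (g c : Int) (fuel : Nat) (l : List (List (String × Int)))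
    (h0 : 0 ≤ c) (hc : c ≤ (pvMc g l : Int)) :
    (pvWhile g c (fuel + 1) l 0).1 = pvResetK g c l := by
  by_cases hc0 : 0 < c
  · rw [pvWhile, if_pos hc0, pvForPass_eq g c l 0 (by omega)]
    have hmin : (0 : Int) + min (c - 0) (pvMc g l : Int) = c := by omega
    rw [sub_zero] at *
    simp only [hmin]
    rw [pvWhile_done g c fuel _ c (by omega)]
  · have hc' : c = 0 := by omega
    subst hc'
    rw [pvWhile, if_neg (by omega), pvResetK_nonpos g 0 (by omega) l]

theorem pvMc_resetK (g g' k : Int) (hg1 : g ≠ 1) (hgg : g ≠ g') (l : List (List (String × Int))) :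
    pvMc g (pvResetK g' k l) = pvMc g l := by
  induction l generalizing k with
  | nil => rfl
  | cons p rest ih =>
    by_cases hp : pvGs p = some g' ∧ 0 < k
    · rw [pvResetK, if_pos hp]
      have ih' := ih (k - 1)
      simp only [pvMc] at ih' ⊢
      rw [List.countP_cons, List.countP_cons, ih']
      have e1 : (decide (pvGs (pvSet1 p) = some g)) = false := by
        simp [pvGs_set1]; omega
      have e2 : (decide (pvGs p = some g)) = false := by
        simp [hp.1]; omega
      rw [e1, e2]
    · rw [pvResetK, if_neg hp]
      have ih' := ih k
      simp only [pvMc] at ih'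
      simp [pvMc, List.countP_cons, ih']

theorem pvFoldStep_congr (sizes : List Int) (r r' : Int → Int)
    (h : ∀ g ∈ sizes, r g = r' g) (l : List (List (String × Int))) :
    pvFoldStep r sizes l = pvFoldStep r' sizes l := by
  induction sizes generalizing l with
  | nil => rfl
  | cons s ss ih =>
    simp only [pvFoldStep, List.foldl_cons]
    rw [h s (by simp)]
    exact ih (fun g hg => h g (by simp [hg])) _

theorem pvFoldStep_cons (sizes : List Int) (r : Int → Int) (p : List (String × Int))
    (rest : List (List (String × Int))) (h1 : (1 : Int) ∉ sizes) (hnd : sizes.Nodup) :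
    pvFoldStep r sizes (p :: rest) =
      match pvGs p with
      | some g0 =>
        if g0 ∈ sizes ∧ 0 < r g0 then pvSet1 p :: pvFoldStep (pvDec r g0) sizes rest
        else p :: pvFoldStep r sizes rest
      | none => p :: pvFoldStep r sizes rest := by
  induction sizes generalizing r p rest with
  | nil =>
    cases hg : pvGs p with
    | none => rfl
    | some g0 => simp [pvFoldStep]
  | cons s ss ih =>
    have hss1 : (1 : Int) ∉ ss := fun h => h1 (by simp [h])
    have hsss : s ∉ ss := (List.nodup_cons.mp hnd).1
    have hndss : ss.Nodup := (List.nodup_cons.mp hnd).2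
    have unfold1 : ∀ (l : List (List (String × Int))) (r' : Int → Int),
        pvFoldStep r' (s :: ss) l = pvFoldStep r' ss (pvResetK s (r' s) l) := by
      intro l r'; rfl
    rw [unfold1]
    cases hg : pvGs p with
    | none =>
      rw [pvResetK, if_neg (by simp [hg]), ih r p _ hss1 hndss, hg, unfold1]
    | some g0 =>
      by_cases hA : g0 = s ∧ 0 < r s
      · -- the head is consumed by size s
        rw [pvResetK, if_pos ⟨by rw [hg, hA.1], hA.2⟩,
          ih r (pvSet1 p) _ hss1 hndss, pvGs_set1]
        dsimp only
        rw [if_neg (fun hh => hss1 hh.1)]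
        rw [if_pos ⟨by simp [hA.1], by rw [hA.1]; exact hA.2⟩, unfold1]
        have hdecs : pvDec r g0 s = r s - 1 := by simp [pvDec, hA.1]
        rw [hdecs]
        apply congrArg
        apply pvFoldStep_congr
        intro g hgss
        have hgne : g ≠ g0 := by rw [hA.1]; intro h; exact hsss (h ▸ hgss)
        simp [pvDec, hgne]
      · -- the head passes size s untouched
        rw [pvResetK, if_neg (by
            rw [hg]; rintro ⟨hh, hpos⟩
            exact hA ⟨Option.some.inj hh, hpos⟩),
          ih r p _ hss1 hndss, hg]
        dsimp only
        by_cases hB : g0 ∈ ss ∧ 0 < r g0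
        · have hgs : g0 ≠ s := fun h => hsss (h ▸ hB.1)
          rw [if_pos hB, if_pos ⟨by simp [hB.1], hB.2⟩, unfold1]
          have hdecs : pvDec r g0 s = r s := by simp [pvDec, Ne.symm hgs]
          rw [hdecs]
        · have hcond : ¬ (g0 ∈ s :: ss ∧ 0 < r g0) := by
            rintro ⟨hmem, hpos⟩
            rcases List.mem_cons.mp hmem with h | h
            · exact hA ⟨h, h ▸ hpos⟩
            · exact hB ⟨h, hpos⟩
          rw [if_neg hB, if_neg hcond, unfold1]

theorem pvFoldStep_nil (sizes : List Int) (r : Int → Int) : pvFoldStep r sizes [] = [] := by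
  induction sizes generalizing r with
  | nil => rfl
  | cons s ss ih => exact ih r

theorem pvFoldStep_eq_resetF (l : List (List (String × Int))) (r : Int → Int) :
    pvFoldStep r [2, 3, 4, 5, 6, 7] l = pvResetF r l := by
  induction l generalizing r with
  | nil => rw [pvFoldStep_nil]; rfl
  | cons p rest ih =>
    rw [pvFoldStep_cons _ _ _ _ (by decide) (by decide)]
    cases hg : pvGs p with
    | none => rw [pvResetF, hg]; dsimp only; rw [ih]
    | some g =>
      rw [pvResetF, hg]; dsimp only
      by_cases hc : 2 ≤ g ∧ g ≤ 7 ∧ 0 < r g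
      · rw [if_pos (show g ∈ ([2,3,4,5,6,7] : List Int) ∧ 0 < r g from
          ⟨by simp; omega, hc.2.2⟩), if_pos hc, ih]
      · rw [if_neg (fun hh => by
          have hmem := hh.1
          simp at hmem
          exact hc ⟨by omega, by omega, hh.2⟩), if_neg hc, ih]

theorem pvCounts_getD (l : List (List (String × Int))) (d : PySem.Dict Int Int) (g : Int) :
    (l.foldl (fun d psgr =>
        match pvGs psgr with
        | some g => d.insert g (d.getD g 0 + 1)
        | none => d) d).getD g 0 = d.getD g 0 + (pvMc g l : Int) := by
  induction l generalizing d with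
  | nil => simp [pvMc]
  | cons p rest ih =>
    cases hg : pvGs p with
    | none =>
      simp only [List.foldl_cons, hg]
      rw [ih]
      simp [pvMc, hg]
    | some g' =>
      simp only [List.foldl_cons, hg]
      rw [ih, PySem.Dict.getD_insert]
      have hmc : (pvMc g (p :: rest) : Int) =
          (pvMc g rest : Int) + (if g = g' then 1 else 0) := by
        simp only [pvMc, List.countP_cons, hg]
        by_cases h : g = g'
        · simp [h]
        · simp [h]
          intro hh
          exact absurd hh.symm h
      rw [hmc]
      by_cases h : g = g'
      · simp [h]
        omega
      · simp [h]

theorem pvPassB (l : List (List (String × Int))) (d : PySem.Dict Int Int) (r : Int → Int)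
    (acc : List (List (String × Int)))
    (hinv : ∀ g : Int, 2 ≤ g → g ≤ 7 → d.getD g 0 = r g) :
    (l.foldl (fun (st : PySem.Dict Int Int × List (List (String × Int))) psgr =>
        match pvGs psgr with
        | some g =>
          if 2 ≤ g ∧ g ≤ 7 ∧ 0 < st.1.getD g 0 then
            (st.1.insert g (st.1.getD g 0 - 1), st.2 ++ [pvSet1 psgr])
          else (st.1, st.2 ++ [psgr])
        | none => (st.1, st.2 ++ [psgr])) (d, acc)).2 = acc ++ pvResetF r l := by
  induction l generalizing d r acc with
  | nil => simp [pvResetF]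
  | cons p rest ih =>
    cases hg : pvGs p with
    | none =>
      simp only [List.foldl_cons, hg]
      rw [pvResetF, hg]
      dsimp only
      rw [ih _ _ _ hinv]
      simp
    | some g =>
      simp only [List.foldl_cons, hg]
      rw [pvResetF, hg]
      dsimp only
      by_cases hc : 2 ≤ g ∧ g ≤ 7 ∧ 0 < r g
      · rw [if_pos (by rw [hinv g hc.1 hc.2.1]; exact hc), if_pos hc]
        have hinv' : ∀ x : Int, 2 ≤ x → x ≤ 7 →
            (d.insert g (d.getD g 0 - 1)).getD x 0 = pvDec r g x := by
          intro x hx2 hx7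
          rw [PySem.Dict.getD_insert, pvDec]
          by_cases h : x = g
          · simp [h, hinv g hc.1 hc.2.1]
          · simp [h, hinv x hx2 hx7]
        rw [ih _ _ _ hinv']
        simp
      · rw [if_neg (by
          intro hh
          exact hc ⟨hh.1, hh.2.1, by rw [← hinv g hh.1 hh.2.1]; exact hh.2.2⟩), if_neg hc]
        rw [ih _ _ _ hinv]
        simp

theorem pvB_eq (l : List (List (String × Int))) :
    set_groups_alt l = pvResetF (pvR0 l) l := by
  unfold set_groups_alt
  rw [show PySem.List.pyRange 2 8 1 = [2, 3, 4, 5, 6, 7] from by decide]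
  rw [pvPassB l _ (pvR0 l) [] ?_]
  · simp
  · intro g hg2 hg7
    have hc : ∀ x : Int, (l.foldl (fun d psgr =>
        match pvGs psgr with
        | some g => d.insert g (d.getD g 0 + 1)
        | none => d) (PySem.Dict.mk ([] : List (Int × Int)))).getD x 0 = (pvMc x l : Int) := by
      intro x
      rw [pvCounts_getD]
      simp [PySem.Dict.getD_eq_get?_getD, PySem.Dict.get?]
    interval_cases g <;>
      simp [List.foldl_cons, List.foldl_nil, PySem.Dict.getD_insert, hc, pvR0]

theorem pvModLe (l : List (List (String × Int))) (i : Int) (hi : 0 < i) :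
    0 ≤ pvR0 l i ∧ pvR0 l i ≤ (pvMc i l : Int) := by
  unfold pvR0
  refine ⟨PySem.Int.mod_nonneg _ hi, ?_⟩
  have h1 := PySem.Int.floordiv_mul_add_mod ((pvMc i l : Nat) : Int) i
  have h2 : 0 ≤ PySem.Int.floordiv ((pvMc i l : Nat) : Int) i := by
    rw [PySem.Int.floordiv_eq_ediv_of_pos hi]
    exact Int.ediv_nonneg (by positivity) hi.le
  nlinarith

theorem pvA_eq (l : List (List (String × Int))) :
    set_groups l = pvFoldStep (pvR0 l) [2, 3, 4, 5, 6, 7] l := by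
  have hcount : ∀ i : Int,
      List.foldl (fun count psgr => if pvGs psgr = some i then count + 1 else count) 0 l
        = ((pvMc i l : Nat) : Int) := by
    intro i
    rw [PySem.List.foldl_ite_add_one]
    simp [pvMc]
  have hcorr : ∀ i : Int, 0 < i →
      ((pvMc i l : Nat) : Int) - i * (((pvMc i l : Nat) : Int) / i) = pvR0 l i := by
    intro i hi
    have h := PySem.Int.floordiv_mul_add_mod ((pvMc i l : Nat) : Int) i
    rw [PySem.Int.floordiv_eq_ediv_of_pos hi] at h
    unfold pvR0
    linarith
  unfold set_groups get_correction_counts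
  dsimp only
  rw [show PySem.List.pyRange 1 (7 + 1) = [1, 2, 3, 4, 5, 6, 7] from by decide,
      show PySem.List.pyRange 1 7 = [1, 2, 3, 4, 5, 6] from by decide]
  simp only [List.foldl_cons, List.foldl_nil, List.nil_append, List.cons_append,
    hcount]
  simp only [PySem.List.pyGet?, PySem.List.pyIdx?]
  norm_num
  simp only [show Int.toNat 2 = 2 from rfl,
    show Int.toNat 3 = 3 from rfl, show Int.toNat 4 = 4 from rfl,
    show Int.toNat 5 = 5 from rfl, show Int.toNat 6 = 6 from rfl]
  norm_num [PySem.Dict.get?_mk_cons]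
  rw [hcorr 2 (by norm_num), hcorr 3 (by norm_num), hcorr 4 (by norm_num),
      hcorr 5 (by norm_num), hcorr 6 (by norm_num), hcorr 7 (by norm_num)]
  have hmc3 : pvMc 3 (pvResetK 2 (pvR0 l 2) l) = pvMc 3 l := by
    rw [pvMc_resetK 3 2 _ (by norm_num) (by norm_num)]
  have hmc4 : pvMc 4 (pvResetK 3 (pvR0 l 3) (pvResetK 2 (pvR0 l 2) l)) = pvMc 4 l := by
    rw [pvMc_resetK 4 3 _ (by norm_num) (by norm_num),
        pvMc_resetK 4 2 _ (by norm_num) (by norm_num)]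
  have hmc5 : pvMc 5 (pvResetK 4 (pvR0 l 4) (pvResetK 3 (pvR0 l 3) (pvResetK 2 (pvR0 l 2) l)))
      = pvMc 5 l := by
    rw [pvMc_resetK 5 4 _ (by norm_num) (by norm_num),
        pvMc_resetK 5 3 _ (by norm_num) (by norm_num),
        pvMc_resetK 5 2 _ (by norm_num) (by norm_num)]
  have hmc6 : pvMc 6 (pvResetK 5 (pvR0 l 5)
      (pvResetK 4 (pvR0 l 4) (pvResetK 3 (pvR0 l 3) (pvResetK 2 (pvR0 l 2) l)))) = pvMc 6 l := by
    rw [pvMc_resetK 6 5 _ (by norm_num) (by norm_num),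
        pvMc_resetK 6 4 _ (by norm_num) (by norm_num),
        pvMc_resetK 6 3 _ (by norm_num) (by norm_num),
        pvMc_resetK 6 2 _ (by norm_num) (by norm_num)]
  have hmc7 : pvMc 7 (pvResetK 6 (pvR0 l 6) (pvResetK 5 (pvR0 l 5)
      (pvResetK 4 (pvR0 l 4) (pvResetK 3 (pvR0 l 3) (pvResetK 2 (pvR0 l 2) l))))) = pvMc 7 l := by
    rw [pvMc_resetK 7 6 _ (by norm_num) (by norm_num),
        pvMc_resetK 7 5 _ (by norm_num) (by norm_num),
        pvMc_resetK 7 4 _ (by norm_num) (by norm_num),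
        pvMc_resetK 7 3 _ (by norm_num) (by norm_num),
        pvMc_resetK 7 2 _ (by norm_num) (by norm_num)]
  simp only [eq_false (show ¬("size" = "correction") from by decide),
    eq_false (show ¬("count" = "correction") from by decide),
    eq_false (show ¬("unique_count" = "correction") from by decide),
    if_false, Option.getD_some]
  rw [pvWhile_eq 2 (pvR0 l 2) _ l (pvModLe l 2 (by norm_num)).1 (pvModLe l 2 (by norm_num)).2]
  rw [pvWhile_eq 3 (pvR0 l 3) _ _ (pvModLe l 3 (by norm_num)).1
    (by rw [hmc3]; exact (pvModLe l 3 (by norm_num)).2)]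
  rw [pvWhile_eq 4 (pvR0 l 4) _ _ (pvModLe l 4 (by norm_num)).1
    (by rw [hmc4]; exact (pvModLe l 4 (by norm_num)).2)]
  rw [pvWhile_eq 5 (pvR0 l 5) _ _ (pvModLe l 5 (by norm_num)).1
    (by rw [hmc5]; exact (pvModLe l 5 (by norm_num)).2)]
  rw [pvWhile_eq 6 (pvR0 l 6) _ _ (pvModLe l 6 (by norm_num)).1
    (by rw [hmc6]; exact (pvModLe l 6 (by norm_num)).2)]
  rw [pvWhile_eq 7 (pvR0 l 7) _ _ (pvModLe l 7 (by norm_num)).1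
    (by rw [hmc7]; exact (pvModLe l 7 (by norm_num)).2)]
  rfl

-- ===== VERDICT (by name: the statement is the Claim_ definition above) =====
theorem set_groups_spec : Claim_equal_set_groups := by
  intro l _ _
  unfold Spec_set_groups
  rw [pvB_eq, pvA_eq, pvFoldStep_eq_resetF]
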